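-- pv_equiv track=rewrite | github.com/NathanLenkiewicz/CSC-110 | benfords_law.py | count_start_digits
-- ===== SOURCE A (Python) =====
-- def count_start_digits(numbers):
--     occurence = {}
--     for i in range(len(numbers)):
--         integer_i = int(numbers[i][0])
--         if (integer_i not in occurence and integer_i != 0):
--             occurence[integer_i] = 1
--         elif (integer_i in occurence and integer_i != 0):
--             occurence[integer_i] += 1
--     return occurence
-- ===== SOURCE B (Python) =====
-- def count_start_digits(numbers):
--     digits = [int(num[0]) for num in numbers]
--     occurence = {}
--     for d in digits:
--         if d != 0 and d not in occurence:
--             occurence[d] = digits.count(d)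
--     return occurence
-- ===== Notes on version B (the rewrite author's own statement) =====
-- stated objective: alternative
-- what changed: B replaces A's single-pass dict of running increments by a two-phase pipeline: it first builds the list of leading digits, then fills the dict by keying each new nonzero digit directly with its total digits.count(d).
import Mathlib
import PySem

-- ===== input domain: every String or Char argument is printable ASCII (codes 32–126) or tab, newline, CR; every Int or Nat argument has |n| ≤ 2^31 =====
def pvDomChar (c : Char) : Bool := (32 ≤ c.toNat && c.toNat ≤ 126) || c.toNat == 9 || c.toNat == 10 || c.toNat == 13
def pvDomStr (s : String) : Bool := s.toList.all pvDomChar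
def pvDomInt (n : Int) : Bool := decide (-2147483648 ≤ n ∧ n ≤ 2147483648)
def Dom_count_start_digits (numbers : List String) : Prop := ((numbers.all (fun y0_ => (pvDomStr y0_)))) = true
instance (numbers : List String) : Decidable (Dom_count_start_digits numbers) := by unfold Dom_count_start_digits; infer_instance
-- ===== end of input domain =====

-- B replaces A's single-pass dict of running increments by a two-phase plan: extract the list of
-- leading digits once, then fill the dict, keying each new nonzero digit directly with its total
-- list.count — an alternative decomposition of the same O(n)-ish task (not claimed faster).

-- ===== PORT A =====
-- A: for i in range(len(numbers)): integer_i = int(numbers[i][0]); grow/increment the dict, skipping 0.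
-- Where Python would raise (empty string / non-digit first char), the port falls back to digit 0
-- (i.e. "skip"); Pre_ excludes those inputs.
def count_start_digits_body (occurence : PySem.Dict Int Int) (num_i : String) : PySem.Dict Int Int :=
  let integer_i : Int :=
    ((PySem.Chars.pyGet? num_i.toList 0).bind (fun c => PySem.Int.ofChars? [c])).getD 0
  if occurence.contains integer_i = false ∧ integer_i ≠ 0 then
    occurence.insert integer_i 1
  else if occurence.contains integer_i = true ∧ integer_i ≠ 0 then
    occurence.insert integer_i (occurence.getD integer_i 0 + 1)
  else occurence

def count_start_digits (numbers : List String) : List (Int × Int) :=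
  ((PySem.List.pyRange 0 (PySem.List.len numbers)).foldl (fun occurence i =>
    count_start_digits_body occurence (PySem.List.pyGetD numbers i ""))
    (PySem.Dict.empty : PySem.Dict Int Int)).items

-- ===== PORT B =====
-- B: digits = [int(num[0]) for num in numbers]; for each new nonzero d insert digits.count(d).
def count_start_digits_alt (numbers : List String) : List (Int × Int) :=
  let digits := numbers.map (fun num =>
    ((PySem.Chars.pyGet? num.toList 0).bind (fun c => PySem.Int.ofChars? [c])).getD 0)
  (digits.foldl (fun occurence d =>
    if d ≠ 0 ∧ occurence.contains d = false then
      occurence.insert d ((PySem.List.count digits d : Int))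
    else occurence) (PySem.Dict.empty : PySem.Dict Int Int)).items

-- ===== PRECONDITION & SPEC =====
-- Pre_ excludes exactly the inputs where the Python A raises: a string that is empty (IndexError on
-- num[0]) or whose first character is not an ASCII digit (ValueError from int(...)).
def Pre_count_start_digits (numbers : List String) : Prop :=
  ∀ s ∈ numbers, s.toList ≠ [] ∧ (s.toList.headD ' ').isDigit = true
instance (numbers : List String) : Decidable (Pre_count_start_digits numbers) := by
  unfold Pre_count_start_digits; infer_instance
def pvWitness_count_start_digits : List String := ["17", "9", "100", "12"]

def Spec_count_start_digits (numbers : List String) (out : List (Int × Int)) : Prop := out = count_start_digits_alt numbers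
instance (numbers : List String) (out : List (Int × Int)) : Decidable (Spec_count_start_digits numbers out) := by unfold Spec_count_start_digits; infer_instance

-- ===== CLAIM (what is proved, stated in full; the proofs are below) =====
def Claim_equal_count_start_digits : Prop := ∀ (numbers : List String), Dom_count_start_digits numbers → Pre_count_start_digits numbers → Spec_count_start_digits numbers (count_start_digits numbers)

-- ===== LEMMAS AND PROOFS =====

-- the leading digit both ports extract (0 = "skip" fallback outside Pre_)
def pvLead (s : String) : Int :=
  ((PySem.Chars.pyGet? s.toList 0).bind (fun c => PySem.Int.ofChars? [c])).getD 0

-- a fold whose step ignores 0 only sees the nonzero elements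
lemma foldl_filter_ne_zero {β : Type} (f : β → Int → β) (h0 : ∀ acc, f acc 0 = acc)
    (l : List Int) (a : β) :
    l.foldl f a = (l.filter (fun d => !(d == 0))).foldl f a := by
  induction l generalizing a with
  | nil => rfl
  | cons x xs ih =>
    by_cases hx : x = 0
    · simp [hx, h0, ih]
    · simp [hx, ih]

-- B's loop over nonzero digits builds exactly (k, cnt k) for the distinct k, in first-occurrence order
lemma items_fold_fresh (cnt : Int → Int) (l : List Int) (h : ∀ x ∈ l, x ≠ 0) :
    (l.foldl (fun occ d => if d ≠ 0 ∧ occ.contains d = false then occ.insert d (cnt d) else occ)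
      (PySem.Dict.empty : PySem.Dict Int Int)).items
      = (PySem.Set.ofList l).map (fun k => (k, cnt k)) := by
  induction l using List.reverseRecOn with
  | nil => rfl
  | append_singleton l x ih =>
    have hl : ∀ y ∈ l, y ≠ 0 := fun y hy => h y (List.mem_append_left _ hy)
    have hx : x ≠ 0 := h x (List.mem_append_right _ (List.mem_singleton_self x))
    rw [List.foldl_append, List.foldl_cons, List.foldl_nil]
    set D := l.foldl (fun occ d => if d ≠ 0 ∧ occ.contains d = false then occ.insert d (cnt d) else occ)
      (PySem.Dict.empty : PySem.Dict Int Int) with hD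
    have hkeys : D.keys = PySem.Set.ofList l := by
      show D.items.map Prod.fst = _
      rw [ih hl]; simp [Function.comp_def]
    have hcont : D.contains x = true ↔ x ∈ l := by
      rw [PySem.Dict.contains_iff_mem_keys, hkeys, PySem.Set.mem_ofList]
    by_cases hmem : x ∈ l
    · have : D.contains x = true := hcont.mpr hmem
      rw [if_neg (by simp [this])]
      rw [ih hl, PySem.Set.ofList_append_singleton,
        PySem.Set.add_of_mem ((PySem.Set.mem_ofList l x).mpr hmem)]
    · have hc : D.contains x = false := by
        cases hcc : D.contains x
        · rfl
        · exact absurd (hcont.mp hcc) hmem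
      rw [if_pos ⟨hx, hc⟩, PySem.Dict.items_insert_of_not_contains _ _ hc, ih hl,
        PySem.Set.ofList_append_singleton,
        PySem.Set.add_of_not_mem (fun hm => hmem ((PySem.Set.mem_ofList l x).mp hm))]
      simp

-- A's fold, restated as a fold over the list of leading digits
lemma countA_eq_digits_fold (numbers : List String) :
    count_start_digits numbers
      = (((numbers.map pvLead).foldl (fun occ d =>
            if occ.contains d = false ∧ d ≠ 0 then occ.insert d 1
            else if occ.contains d = true ∧ d ≠ 0 then occ.insert d (occ.getD d 0 + 1)
            else occ) (PySem.Dict.empty : PySem.Dict Int Int))).items := by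
  unfold count_start_digits
  rw [PySem.List.foldl_pyRange_pyGetD numbers "" count_start_digits_body _ le_rfl]
  rw [List.foldl_map]
  rfl

-- B's definition, with its list comprehension named
lemma countB_eq_digits_fold (numbers : List String) :
    count_start_digits_alt numbers
      = (((numbers.map pvLead).foldl (fun occ d =>
            if d ≠ 0 ∧ occ.contains d = false then
              occ.insert d ((PySem.List.count (numbers.map pvLead) d : Int))
            else occ) (PySem.Dict.empty : PySem.Dict Int Int))).items := rfl

-- ===== VERDICT (by name: the statement is the Claim_ definition above) =====
theorem count_start_digits_spec : Claim_equal_count_start_digits := by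
  intro numbers _ _
  unfold Spec_count_start_digits
  rw [countB_eq_digits_fold]
  set digits := numbers.map pvLead with hdig
  set nz := digits.filter (fun d => !(d == 0)) with hnz
  have hnzmem : ∀ x ∈ nz, x ≠ 0 := by
    intro x hx
    have := (List.mem_filter.mp hx).2
    simpa using this
  -- A side
  rw [countA_eq_digits_fold, ← hdig]
  rw [foldl_filter_ne_zero _ (by intro acc; simp) digits, ← hnz]
  rw [PySem.List.foldl_congr_mem nz _ (fun occ d => occ.insert d (occ.getD d 0 + 1)) _
    (by
      intro acc x hx
      have hx0 : x ≠ 0 := hnzmem x hx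
      cases hc : acc.contains x
      · rw [if_pos ⟨rfl, hx0⟩]
        show _ = acc.insert x (acc.getD x 0 + 1)
        rw [PySem.Dict.getD_of_not_contains acc 0 hc]; norm_num
      · rw [if_neg (by simp), if_pos ⟨rfl, hx0⟩])]
  rw [PySem.Dict.foldl_insert_getD_add_one_eq_counter, PySem.Dict.items_counter]
  -- B side
  rw [foldl_filter_ne_zero _ (by intro acc; simp) digits, ← hnz,
    items_fold_fresh _ nz hnzmem]
  -- counts over nz agree with counts over digits on members of nz
  apply List.map_congr_left
  intro k hk
  have hkmem : k ∈ nz := (PySem.Set.mem_ofList nz k).mp hk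
  have hk0 : k ≠ 0 := hnzmem k hkmem
  rw [PySem.List.count_eq, hnz, List.count_filter (by simp [hk0])]
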